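-- pv_equiv track=rewrite | github.com/NoahSavant/AI-escape-from-the-maze | MapDesign.py | to_goal_map
-- ===== SOURCE A (Python) =====
-- def to_goal_map(map):
--     height = len(map)
--     width = len(map[0])
--     for x in range(1, height - 1):
--         for y in range(1, width - 1):
--             if (x == 1 or x == height - 2 or y == 1 or y == width - 2) and map[x][y] == 1:
--                 if x == 1:
--                     map[x - 1][y] = 3
--                 elif x == height - 2:
--                     map[x + 1][y] = 3
--                 if y == 1:
--                     map[x][y - 1] = 3
--                 elif y == width - 2:
--                     map[x][y + 1] = 3
--     return map
-- ===== SOURCE B (Python) =====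
-- def to_goal_map(map):
--     # Walk only the inner border ring (top/bottom inner rows, left/right inner
--     # columns) instead of the whole interior: O(H+W) marking work vs O(H*W).
--     h = len(map)
--     w = len(map[0])
--     if h >= 3 and w >= 3:
--         for y in range(1, w - 1):
--             if map[1][y] == 1:
--                 map[0][y] = 3
--         if h >= 4:
--             for y in range(1, w - 1):
--                 if map[h - 2][y] == 1:
--                     map[h - 1][y] = 3
--         for x in range(1, h - 1):
--             if map[x][1] == 1:
--                 map[x][0] = 3
--             if w >= 4 and map[x][w - 2] == 1:
--                 map[x][w - 1] = 3
--     return map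
-- ===== Notes on version B (the rewrite author's own statement) =====
-- stated objective: faster
-- what changed: Instead of scanning the whole interior with a nested H*W loop and testing each cell for ring membership, B walks only the inner border ring (top inner row, bottom inner row, and the two inner columns), so the marking work is O(H+W) instead of O(H*W). Pre_ excludes the empty map and ragged maps with >=3 rows and first-row width >=3 in which some row is shorter than the first row: there A's fixed-width indexing raises IndexError on most inputs, and on the few such shapes where no short position is touched A returns the input and B returns the same value.
-- outside the precondition, e.g. on to_goal_map([]): A raises IndexError, B raises IndexError; on to_goal_map([[1, 1, 1], [1], [1, 1, 1]]): A raises IndexError, B raises IndexError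
import Mathlib
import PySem

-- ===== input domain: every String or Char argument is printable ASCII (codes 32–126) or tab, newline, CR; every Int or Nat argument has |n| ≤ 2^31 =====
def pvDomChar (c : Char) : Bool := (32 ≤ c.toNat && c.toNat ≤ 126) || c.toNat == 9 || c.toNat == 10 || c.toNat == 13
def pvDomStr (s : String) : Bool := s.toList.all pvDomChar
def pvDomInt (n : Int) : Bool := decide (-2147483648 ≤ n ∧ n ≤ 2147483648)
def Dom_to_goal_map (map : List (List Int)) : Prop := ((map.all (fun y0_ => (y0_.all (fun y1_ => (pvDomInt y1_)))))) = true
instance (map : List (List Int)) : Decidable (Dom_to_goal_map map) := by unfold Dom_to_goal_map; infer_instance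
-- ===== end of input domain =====

-- B walks only the inner border ring (top/bottom inner rows and the two inner columns)
-- instead of A's nested scan over the whole interior; both mutate the Python list in
-- place in the same way, and the equivalence proved here is about the returned value.

-- ===== PORT A =====
-- shared indexing helpers: the read m[x][y] and the write m[x][y] = v; pyGetD/pySetD are
-- exact for the in-range accesses Pre_ guarantees (Python raises out of range; excluded)
def pvGet2 (m : List (List Int)) (x y : Int) : Int :=
  PySem.List.pyGetD (PySem.List.pyGetD m x []) y 0

def pvSet2 (m : List (List Int)) (x y v : Int) : List (List Int) :=
  PySem.List.pySetD m x (PySem.List.pySetD (PySem.List.pyGetD m x []) y v)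

def to_goal_map (map : List (List Int)) : List (List Int) :=
  let height : Int := map.length
  let width : Int := (map.headD []).length   -- len(map[0]); Python raises on [], excluded by Pre_
  (PySem.List.pyRange 1 (height - 1) 1).foldl (fun m x =>
    (PySem.List.pyRange 1 (width - 1) 1).foldl (fun m y =>
      if (x = 1 ∨ x = height - 2 ∨ y = 1 ∨ y = width - 2) ∧ pvGet2 m x y = 1 then
        let m' := if x = 1 then pvSet2 m (x - 1) y 3
                  else if x = height - 2 then pvSet2 m (x + 1) y 3 else m
        if y = 1 then pvSet2 m' x (y - 1) 3
        else if y = width - 2 then pvSet2 m' x (y + 1) 3 else m'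
      else m) m) map

-- ===== PORT B =====
def to_goal_map_alt (map : List (List Int)) : List (List Int) :=
  let h : Int := map.length
  let w : Int := (map.headD []).length
  if 3 ≤ h ∧ 3 ≤ w then
    let m1 := (PySem.List.pyRange 1 (w - 1) 1).foldl (fun m y =>
      if pvGet2 m 1 y = 1 then pvSet2 m 0 y 3 else m) map
    let m2 := if 4 ≤ h then
        (PySem.List.pyRange 1 (w - 1) 1).foldl (fun m y =>
          if pvGet2 m (h - 2) y = 1 then pvSet2 m (h - 1) y 3 else m) m1
      else m1
    (PySem.List.pyRange 1 (h - 1) 1).foldl (fun m x =>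
      let m' := if pvGet2 m x 1 = 1 then pvSet2 m x 0 3 else m
      if 4 ≤ w ∧ pvGet2 m' x (w - 2) = 1 then pvSet2 m' x (w - 1) 3 else m') m2
  else map

-- ===== PRECONDITION & SPEC =====
-- Pre_ excludes the empty map (A raises IndexError at len(map[0])) and ragged maps with
-- ≥3 rows and first-row width ≥3 in which some row is shorter than the first row: there
-- A's fixed-width indexing raises IndexError on most inputs, and on the few such shapes
-- where no short position is touched A returns the input and B returns the same value.
def Pre_to_goal_map (map : List (List Int)) : Prop :=
  map ≠ [] ∧ (map.length ≤ 2 ∨ (map.headD []).length ≤ 2 ∨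
    ∀ row ∈ map, (map.headD []).length ≤ row.length)
instance (map : List (List Int)) : Decidable (Pre_to_goal_map map) := by
  unfold Pre_to_goal_map; infer_instance

def pvWitness_to_goal_map : List (List Int) := [[1, 1, 1], [1, 1, 1], [1, 1, 1]]

def Spec_to_goal_map (map : List (List Int)) (out : List (List Int)) : Prop := out = to_goal_map_alt map
instance (map : List (List Int)) (out : List (List Int)) : Decidable (Spec_to_goal_map map out) := by unfold Spec_to_goal_map; infer_instance

-- ===== CLAIM (what is proved, stated in full; the proofs are below) =====
def Claim_equal_to_goal_map : Prop := ∀ (map : List (List Int)), Dom_to_goal_map map → Pre_to_goal_map map → Spec_to_goal_map map (to_goal_map map)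

-- ===== LEMMAS AND PROOFS =====

-- proof-side primitives: one write (set cell p to 3) and one read, Nat-indexed
def wrN (m : List (List Int)) (p : Nat × Nat) : List (List Int) :=
  m.set p.1 ((m.getD p.1 []).set p.2 3)

def rdN (m : List (List Int)) (i j : Nat) : Int := (m.getD i []).getD j 0

theorem pvGet2_toNat (m : List (List Int)) (i j : Int) (hi : 0 ≤ i) (hj : 0 ≤ j) :
    pvGet2 m i j = rdN m i.toNat j.toNat := by
  unfold pvGet2 rdN; lift i to Nat using hi; lift j to Nat using hj; simp

theorem pvSet2_toNat (m : List (List Int)) (i j : Int) (hi : 0 ≤ i) (hj : 0 ≤ j) :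
    pvSet2 m i j 3 = wrN m (i.toNat, j.toNat) := by
  unfold pvSet2 wrN; lift i to Nat using hi; lift j to Nat using hj; simp

theorem length_wrN (m : List (List Int)) (p : Nat × Nat) : (wrN m p).length = m.length := by
  simp [wrN]

theorem rowLen_wrN (m : List (List Int)) (p : Nat × Nat) (i : Nat) :
    ((wrN m p).getD i []).length = (m.getD i []).length := by
  rcases p with ⟨a, b⟩
  simp only [wrN, List.getD, List.getElem?_set]
  split_ifs with h1 h2
  · subst h1; simp [List.getElem?_eq_getElem h2]
  · subst h1; rw [List.getElem?_eq_none (by omega)]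
  · rfl

theorem rdN_wrN_ne (m : List (List Int)) (p : Nat × Nat) (i j : Nat) (h : p ≠ (i, j)) :
    rdN (wrN m p) i j = rdN m i j := by
  rcases p with ⟨a, b⟩
  simp only [wrN, rdN, List.getD]
  by_cases h1 : a = i
  · subst h1
    have hb : b ≠ j := fun hbj => h (by rw [hbj])
    rw [List.getElem?_set]
    simp only [if_pos rfl]
    by_cases h2 : a < m.length
    · simp [h2, List.getElem?_set_ne hb, List.getD]
    · simp [h2, List.getElem?_eq_none (show m.length ≤ a by omega)]
  · rw [List.getElem?_set_ne h1]

theorem rdN_wrN (m : List (List Int)) (p : Nat × Nat) (i j : Nat) :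
    rdN (wrN m p) i j =
      if p = (i, j) ∧ i < m.length ∧ j < (m.getD i []).length then 3 else rdN m i j := by
  rcases p with ⟨a, b⟩
  by_cases hp : ((a : Nat), (b : Nat)) = (i, j)
  · rw [Prod.mk.injEq] at hp
    obtain ⟨rfl, rfl⟩ := hp
    by_cases h2 : a < m.length
    · by_cases h3 : b < (m.getD a []).length
      · rw [if_pos ⟨rfl, h2, h3⟩]
        simp only [wrN, rdN, List.getD]
        rw [List.getElem?_set_self h2, Option.getD_some,
          List.getElem?_set_self (by simpa [List.getD] using h3)]
        simp
      · rw [if_neg (by tauto)]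
        simp only [wrN, rdN, List.getD]
        rw [List.getElem?_set_self h2, Option.getD_some,
          List.set_eq_of_length_le (by simp only [List.getD] at h3; omega)]
    · rw [if_neg (by tauto)]
      simp only [wrN]
      rw [List.set_eq_of_length_le (by omega)]
  · rw [if_neg (by tauto)]
    exact rdN_wrN_ne m (a, b) i j hp

theorem length_foldl_wrN (L : List (Nat × Nat)) : ∀ m : List (List Int),
    (L.foldl wrN m).length = m.length := by
  induction L with
  | nil => intro m; rfl
  | cons p L ih => intro m; rw [List.foldl_cons, ih (wrN m p), length_wrN]

theorem rowLen_foldl_wrN (L : List (Nat × Nat)) : ∀ (m : List (List Int)) (i : Nat),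
    ((L.foldl wrN m).getD i []).length = (m.getD i []).length := by
  induction L with
  | nil => intro m i; rfl
  | cons p L ih => intro m i; rw [List.foldl_cons, ih (wrN m p) i, rowLen_wrN]

theorem rdN_foldl_wrN (L : List (Nat × Nat)) : ∀ (m : List (List Int)) (i j : Nat),
    rdN (L.foldl wrN m) i j =
      if (i, j) ∈ L ∧ i < m.length ∧ j < (m.getD i []).length then 3 else rdN m i j := by
  induction L with
  | nil => intro m i j; simp
  | cons p L ih =>
    intro m i j
    rw [List.foldl_cons, ih (wrN m p) i j, length_wrN, rowLen_wrN, rdN_wrN]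
    simp only [List.mem_cons]
    split_ifs with h1 h2 h3 h4 h5 <;> first | rfl | tauto

theorem foldl_wrN_congr (L1 L2 : List (Nat × Nat)) (m : List (List Int))
    (h : ∀ p, p ∈ L1 ↔ p ∈ L2) : L1.foldl wrN m = L2.foldl wrN m := by
  have hl1 := length_foldl_wrN L1 m
  have hl2 := length_foldl_wrN L2 m
  apply List.ext_getElem (by omega)
  intro i h1 h2
  have hr1 := rowLen_foldl_wrN L1 m i
  have hr2 := rowLen_foldl_wrN L2 m i
  have e1 : (L1.foldl wrN m)[i] = (L1.foldl wrN m).getD i [] :=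
    (List.getD_eq_getElem _ _ h1).symm
  have e2 : (L2.foldl wrN m)[i] = (L2.foldl wrN m).getD i [] :=
    (List.getD_eq_getElem _ _ h2).symm
  apply List.ext_getElem (by rw [e1, e2, hr1, hr2])
  intro j hj1 hj2
  have f1 : (L1.foldl wrN m)[i][j] = rdN (L1.foldl wrN m) i j := by
    rw [rdN, ← e1, List.getD_eq_getElem _ _ hj1]
  have f2 : (L2.foldl wrN m)[i][j] = rdN (L2.foldl wrN m) i j := by
    rw [rdN, ← e2, List.getD_eq_getElem _ _ hj2]
  rw [f1, f2, rdN_foldl_wrN, rdN_foldl_wrN]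
  have := h (i, j)
  split_ifs <;> tauto

-- the invariant kept by both loops: shape unchanged, interior cells unchanged
def LoopInv (map m : List (List Int)) : Prop :=
  m.length = map.length ∧ (∀ i, (m.getD i []).length = (map.getD i []).length) ∧
  ∀ i j, 1 ≤ i → i + 1 < map.length → 1 ≤ j → j + 1 < (map.headD []).length →
    rdN m i j = rdN map i j

def Border (map : List (List Int)) (p : Nat × Nat) : Prop :=
  p.1 = 0 ∨ p.1 + 1 = map.length ∨ p.2 = 0 ∨ p.2 + 1 = (map.headD []).length

theorem LoopInv_refl (map : List (List Int)) : LoopInv map map :=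
  ⟨rfl, fun _ => rfl, fun _ _ _ _ _ _ => rfl⟩

theorem LoopInv_wrN (map m : List (List Int)) (p : Nat × Nat) (hInv : LoopInv map m)
    (hb : Border map p) : LoopInv map (wrN m p) := by
  obtain ⟨h1, h2, h3⟩ := hInv
  refine ⟨by rw [length_wrN, h1], fun i => by rw [rowLen_wrN]; exact h2 i, ?_⟩
  intro i j hi hij hj hjW
  rw [rdN_wrN]
  split_ifs with hc
  · exfalso
    rcases p with ⟨a, b⟩
    have ha : a = i := congrArg Prod.fst hc.1
    have hb2 : b = j := congrArg Prod.snd hc.1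
    simp only [Border] at hb
    rcases hb with h | h | h | h <;> omega
  · exact h3 i j hi hij hj hjW

theorem LoopInv_foldl_wrN (map : List (List Int)) (L : List (Nat × Nat))
    (hL : ∀ p ∈ L, Border map p) : ∀ m, LoopInv map m → LoopInv map (L.foldl wrN m) := by
  induction L with
  | nil => intro m hm; exact hm
  | cons p L ih =>
    intro m hm
    rw [List.foldl_cons]
    exact ih (fun q hq => hL q (List.mem_cons_of_mem _ hq))
      _ (LoopInv_wrN map m p hm (hL p List.mem_cons_self))

-- generic single-loop factoring: a loop whose body performs border writes computed from
-- the original map equals folding the write list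
theorem fact_loop (map : List (List Int)) (body : List (List Int) → Int → List (List Int))
    (cell : Int → List (Nat × Nat)) (b : Int)
    (hcell : ∀ y, 1 ≤ y → y < b → ∀ p ∈ cell y, Border map p)
    (hbody : ∀ y, 1 ≤ y → y < b → ∀ m, LoopInv map m → body m y = (cell y).foldl wrN m) :
    ∀ (k : Nat) (a : Int), 1 ≤ a → (b - a).toNat ≤ k → ∀ m, LoopInv map m →
      (PySem.List.pyRange a b 1).foldl body m
        = ((PySem.List.pyRange a b 1).flatMap cell).foldl wrN m := by
  intro k
  induction k with
  | zero =>
    intro a ha hk m hm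
    rw [PySem.List.pyRange_one_eq_nil (by omega)]
    rfl
  | succ k ih =>
    intro a ha hk m hm
    by_cases hab : a < b
    · rw [PySem.List.pyRange_one_cons hab]
      simp only [List.foldl_cons, List.flatMap_cons, List.foldl_append]
      rw [hbody a ha hab m hm]
      exact ih (a + 1) (by omega) (by omega) _
        (LoopInv_foldl_wrN map _ (hcell a ha hab) m hm)
    · rw [PySem.List.pyRange_one_eq_nil (by omega)]
      rfl

theorem border_flatMap (map : List (List Int)) (cell : Int → List (Nat × Nat)) (a b : Int)
    (ha : 1 ≤ a) (hcell : ∀ y, 1 ≤ y → y < b → ∀ p ∈ cell y, Border map p) :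
    ∀ p ∈ (PySem.List.pyRange a b 1).flatMap cell, Border map p := by
  intro p hp
  rw [List.mem_flatMap] at hp
  obtain ⟨y, hy, hpy⟩ := hp
  rw [PySem.List.mem_pyRange_one] at hy
  exact hcell y (by omega) hy.2 p hpy

-- A's per-cell write list, conditions kept in A's Int form
def cellAI (map : List (List Int)) (x y : Int) : List (Nat × Nat) :=
  if (x = 1 ∨ x = (map.length : Int) - 2 ∨ y = 1 ∨ y = ((map.headD []).length : Int) - 2)
      ∧ rdN map x.toNat y.toNat = 1 then
    (if x = 1 then [(0, y.toNat)]
     else if x = (map.length : Int) - 2 then [(map.length - 1, y.toNat)] else []) ++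
    (if y = 1 then [(x.toNat, 0)]
     else if y = ((map.headD []).length : Int) - 2 then [(x.toNat, (map.headD []).length - 1)] else [])
  else []

theorem cellAI_border (map : List (List Int)) (x y : Int) (hx : 1 ≤ x) (hy : 1 ≤ y) :
    ∀ p ∈ cellAI map x y, Border map p := by
  intro p hp
  unfold cellAI at hp
  unfold Border
  split_ifs at hp with hc h1 h2 h3 h4 <;>
    simp only [List.mem_append, List.mem_cons, List.not_mem_nil, or_false, false_or] at hp <;>
    first
      | exact hp.elim
      | (obtain rfl | rfl := hp <;> simp <;> omega)
      | (obtain rfl := hp; simp; omega)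

def bodyAy (map : List (List Int)) (x : Int) (m : List (List Int)) (y : Int) : List (List Int) :=
  if (x = 1 ∨ x = (map.length : Int) - 2 ∨ y = 1 ∨ y = ((map.headD []).length : Int) - 2)
      ∧ pvGet2 m x y = 1 then
    let m' := if x = 1 then pvSet2 m (x - 1) y 3
              else if x = (map.length : Int) - 2 then pvSet2 m (x + 1) y 3 else m
    if y = 1 then pvSet2 m' x (y - 1) 3
    else if y = ((map.headD []).length : Int) - 2 then pvSet2 m' x (y + 1) 3 else m'
  else m

theorem bodyA_step (map : List (List Int)) (x y : Int)
    (hx1 : 1 ≤ x) (hx2 : x + 1 < (map.length : Int))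
    (hy1 : 1 ≤ y) (hy2 : y + 1 < ((map.headD []).length : Int))
    (m : List (List Int)) (hInv : LoopInv map m) :
    bodyAy map x m y = (cellAI map x y).foldl wrN m := by
  have hget : pvGet2 m x y = rdN map x.toNat y.toNat := by
    rw [pvGet2_toNat m x y (by omega) (by omega)]
    exact hInv.2.2 _ _ (by omega) (by omega) (by omega) (by omega)
  unfold bodyAy cellAI
  rw [hget]
  split_ifs with hc h1 h3 h4 h2 h3 h4 h3 h4 <;>
    first
    | rfl
    | (exfalso; tauto)
    | (simp only [List.foldl_append, List.foldl_cons, List.foldl_nil]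
       rw [pvSet2_toNat _ _ _ (by omega) (by omega)]
       try rw [pvSet2_toNat _ _ _ (by omega) (by omega)]
       congr 1 <;> (try congr 1) <;> (try congr 1) <;> (try simp only [Prod.mk.injEq]) <;>
         first | rfl | omega)

-- A's full write list
def LA (map : List (List Int)) : List (Nat × Nat) :=
  (PySem.List.pyRange 1 ((map.length : Int) - 1) 1).flatMap (fun x =>
    (PySem.List.pyRange 1 (((map.headD []).length : Int) - 1) 1).flatMap (fun y =>
      cellAI map x y))

theorem factA (map : List (List Int)) : to_goal_map map = (LA map).foldl wrN map := by
  have hrow : ∀ x, 1 ≤ x → x < (map.length : Int) - 1 → ∀ m, LoopInv map m →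
      (PySem.List.pyRange 1 (((map.headD []).length : Int) - 1) 1).foldl (bodyAy map x) m
        = ((PySem.List.pyRange 1 (((map.headD []).length : Int) - 1) 1).flatMap
            (cellAI map x)).foldl wrN m := by
    intro x hx1 hx2 m hm
    exact fact_loop map (bodyAy map x) (cellAI map x) _
      (fun y hy1 _ => cellAI_border map x y hx1 hy1)
      (fun y hy1 hy2 m hm => bodyA_step map x y hx1 (by omega) hy1 (by omega) m hm)
      ((((map.headD []).length : Int) - 1) - 1).toNat 1 le_rfl le_rfl m hm
  exact fact_loop map
    (fun m x => (PySem.List.pyRange 1 (((map.headD []).length : Int) - 1) 1).foldl (bodyAy map x) m)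
    (fun x => (PySem.List.pyRange 1 (((map.headD []).length : Int) - 1) 1).flatMap (cellAI map x))
    ((map.length : Int) - 1)
    (fun x hx1 _ => border_flatMap map (cellAI map x) 1 _ le_rfl
      (fun y hy1 _ => cellAI_border map x y hx1 hy1))
    (fun x hx1 hx2 m hm => hrow x hx1 hx2 m hm)
    (((map.length : Int) - 1) - 1).toNat 1 le_rfl le_rfl map (LoopInv_refl map)

-- B's write lists
def cellBtop (map : List (List Int)) (y : Int) : List (Nat × Nat) :=
  if rdN map 1 y.toNat = 1 then [(0, y.toNat)] else []

def cellBbot (map : List (List Int)) (y : Int) : List (Nat × Nat) :=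
  if rdN map (map.length - 2) y.toNat = 1 then [(map.length - 1, y.toNat)] else []

def cellBside (map : List (List Int)) (x : Int) : List (Nat × Nat) :=
  (if rdN map x.toNat 1 = 1 then [(x.toNat, 0)] else []) ++
  (if 4 ≤ ((map.headD []).length : Int) ∧ rdN map x.toNat ((map.headD []).length - 2) = 1
   then [(x.toNat, (map.headD []).length - 1)] else [])

def LB (map : List (List Int)) : List (Nat × Nat) :=
  (PySem.List.pyRange 1 (((map.headD []).length : Int) - 1) 1).flatMap (cellBtop map) ++
  (if 4 ≤ (map.length : Int) then
    (PySem.List.pyRange 1 (((map.headD []).length : Int) - 1) 1).flatMap (cellBbot map)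
   else []) ++
  (PySem.List.pyRange 1 ((map.length : Int) - 1) 1).flatMap (cellBside map)

theorem bodyBtop_step (map : List (List Int)) (hn : 3 ≤ map.length) (y : Int)
    (hy1 : 1 ≤ y) (hy2 : y < ((map.headD []).length : Int) - 1)
    (m : List (List Int)) (hm : LoopInv map m) :
    (if pvGet2 m 1 y = 1 then pvSet2 m 0 y 3 else m) = (cellBtop map y).foldl wrN m := by
  have hg : pvGet2 m 1 y = rdN map 1 y.toNat := by
    rw [pvGet2_toNat m 1 y (by omega) (by omega)]
    simpa using hm.2.2 (1 : Int).toNat y.toNat (by omega) (by omega) (by omega) (by omega)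
  unfold cellBtop
  rw [hg]
  split_ifs with h
  · rw [pvSet2_toNat _ _ _ (by omega) (by omega)]
    simp [List.foldl]
  · rfl

theorem bodyBbot_step (map : List (List Int)) (hn : 4 ≤ map.length) (y : Int)
    (hy1 : 1 ≤ y) (hy2 : y < ((map.headD []).length : Int) - 1)
    (m : List (List Int)) (hm : LoopInv map m) :
    (if pvGet2 m ((map.length : Int) - 2) y = 1 then pvSet2 m ((map.length : Int) - 1) y 3 else m)
      = (cellBbot map y).foldl wrN m := by
  have hg : pvGet2 m ((map.length : Int) - 2) y = rdN map (map.length - 2) y.toNat := by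
    rw [pvGet2_toNat m _ y (by omega) (by omega),
      show ((map.length : Int) - 2).toNat = map.length - 2 by omega]
    exact hm.2.2 (map.length - 2) y.toNat (by omega) (by omega) (by omega) (by omega)
  unfold cellBbot
  rw [hg]
  split_ifs with h
  · rw [pvSet2_toNat _ _ _ (by omega) (by omega),
      show ((map.length : Int) - 1).toNat = map.length - 1 by omega]
    try simp [List.foldl]
  · rfl

theorem bodyBside_step (map : List (List Int)) (hW : 3 ≤ (map.headD []).length) (x : Int)
    (hx1 : 1 ≤ x) (hx2 : x < (map.length : Int) - 1)
    (m : List (List Int)) (hm : LoopInv map m) :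
    (if 4 ≤ ((map.headD []).length : Int) ∧
        pvGet2 (if pvGet2 m x 1 = 1 then pvSet2 m x 0 3 else m) x (((map.headD []).length : Int) - 2) = 1
     then pvSet2 (if pvGet2 m x 1 = 1 then pvSet2 m x 0 3 else m) x (((map.headD []).length : Int) - 1) 3
     else (if pvGet2 m x 1 = 1 then pvSet2 m x 0 3 else m))
      = (cellBside map x).foldl wrN m := by
  have hg1 : pvGet2 m x 1 = rdN map x.toNat 1 := by
    rw [pvGet2_toNat m x 1 (by omega) (by omega)]
    simpa using hm.2.2 x.toNat (1 : Int).toNat (by omega) (by omega) (by omega) (by omega)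
  have hrd2 : ∀ m2, LoopInv map m2 →
      pvGet2 m2 x (((map.headD []).length : Int) - 2) = rdN map x.toNat ((map.headD []).length - 2) := by
    intro m2 hm2
    rw [pvGet2_toNat m2 x _ (by omega) (by omega),
      show (((map.headD []).length : Int) - 2).toNat = (map.headD []).length - 2 by omega]
    exact hm2.2.2 x.toNat ((map.headD []).length - 2) (by omega) (by omega) (by omega) (by omega)
  have e0 : pvSet2 m x 0 3 = wrN m (x.toNat, 0) := by
    rw [pvSet2_toNat m x 0 (by omega) (by omega)]
    rfl
  unfold cellBside
  rw [hg1]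
  by_cases h1 : rdN map x.toNat 1 = 1
  · simp only [if_pos h1, e0]
    have hm' : LoopInv map (wrN m (x.toNat, 0)) :=
      LoopInv_wrN map m _ hm (Or.inr (Or.inr (Or.inl rfl)))
    rw [hrd2 _ hm']
    by_cases h2 : 4 ≤ ((map.headD []).length : Int) ∧
        rdN map x.toNat ((map.headD []).length - 2) = 1
    · rw [if_pos h2, if_pos h2, pvSet2_toNat _ x _ (by omega) (by omega),
        show (((map.headD []).length : Int) - 1).toNat = (map.headD []).length - 1 by omega]
      try simp [List.foldl]
    · rw [if_neg h2, if_neg h2]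
      try simp [List.foldl]
  · simp only [if_neg h1]
    rw [hrd2 m hm]
    by_cases h2 : 4 ≤ ((map.headD []).length : Int) ∧
        rdN map x.toNat ((map.headD []).length - 2) = 1
    · rw [if_pos h2, if_pos h2, pvSet2_toNat m x _ (by omega) (by omega),
        show (((map.headD []).length : Int) - 1).toNat = (map.headD []).length - 1 by omega]
      try simp [List.foldl]
    · rw [if_neg h2, if_neg h2]
      try simp [List.foldl]

theorem factB (map : List (List Int)) (hn : 3 ≤ map.length) (hW : 3 ≤ (map.headD []).length) :
    to_goal_map_alt map = (LB map).foldl wrN map := by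
  unfold to_goal_map_alt LB
  rw [if_pos (show (3 : Int) ≤ (map.length : Int) ∧ (3 : Int) ≤ ((map.headD []).length : Int) by omega)]
  simp only [List.foldl_append]
  have hcelltop : ∀ y : Int, 1 ≤ y → y < ((map.headD []).length : Int) - 1 →
      ∀ p ∈ cellBtop map y, Border map p := by
    intro y _ _ p hp
    unfold cellBtop at hp
    split_ifs at hp <;> simp_all [Border]
  have htop := fact_loop map _ (cellBtop map) (((map.headD []).length : Int) - 1) hcelltop
    (fun y hy1 hy2 m hm => bodyBtop_step map hn y hy1 hy2 m hm)
    ((((map.headD []).length : Int) - 1) - 1).toNat 1 le_rfl le_rfl map (LoopInv_refl map)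
  rw [htop]
  have hInv1 := LoopInv_foldl_wrN map _
    (border_flatMap map (cellBtop map) 1 _ le_rfl hcelltop) map (LoopInv_refl map)
  set m1 := ((PySem.List.pyRange 1 (((map.headD []).length : Int) - 1) 1).flatMap
    (cellBtop map)).foldl wrN map with hm1def
  have hcellbot : ∀ y : Int, 1 ≤ y → y < ((map.headD []).length : Int) - 1 →
      ∀ p ∈ cellBbot map y, Border map p := by
    intro y _ _ p hp
    unfold cellBbot at hp
    split_ifs at hp <;> simp_all [Border] <;> omega
  have hcellside : ∀ x : Int, 1 ≤ x → x < (map.length : Int) - 1 →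
      ∀ p ∈ cellBside map x, Border map p := by
    intro x _ _ p hp
    unfold cellBside at hp
    simp only [List.mem_append] at hp
    rcases hp with hp | hp <;> split_ifs at hp <;> simp_all [Border] <;> omega
  by_cases h4 : (4 : Int) ≤ (map.length : Int)
  · rw [if_pos h4, if_pos h4]
    have hbot := fact_loop map _ (cellBbot map) (((map.headD []).length : Int) - 1) hcellbot
      (fun y hy1 hy2 m hm => bodyBbot_step map (by omega) y hy1 hy2 m hm)
      ((((map.headD []).length : Int) - 1) - 1).toNat 1 le_rfl le_rfl m1 hInv1
    rw [hbot]
    have hInv2 := LoopInv_foldl_wrN map _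
      (border_flatMap map (cellBbot map) 1 _ le_rfl hcellbot) m1 hInv1
    exact fact_loop map _ (cellBside map) ((map.length : Int) - 1) hcellside
      (fun x hx1 hx2 m hm => bodyBside_step map hW x hx1 hx2 m hm)
      (((map.length : Int) - 1) - 1).toNat 1 le_rfl le_rfl _ hInv2
  · rw [if_neg h4, if_neg h4]
    simp only [List.foldl_nil]
    exact fact_loop map _ (cellBside map) ((map.length : Int) - 1) hcellside
      (fun x hx1 hx2 m hm => bodyBside_step map hW x hx1 hx2 m hm)
      (((map.length : Int) - 1) - 1).toNat 1 le_rfl le_rfl m1 hInv1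

-- the marked border cells, characterised once and for all
def MarkP (map : List (List Int)) (i j : Nat) : Prop :=
  (i = 0 ∧ 1 ≤ j ∧ j + 1 < (map.headD []).length ∧ rdN map 1 j = 1) ∨
  (i + 1 = map.length ∧ 4 ≤ map.length ∧ 1 ≤ j ∧ j + 1 < (map.headD []).length ∧
    rdN map (map.length - 2) j = 1) ∨
  (j = 0 ∧ 1 ≤ i ∧ i + 1 < map.length ∧ rdN map i 1 = 1) ∨
  (j + 1 = (map.headD []).length ∧ 4 ≤ (map.headD []).length ∧ 1 ≤ i ∧
    i + 1 < map.length ∧ rdN map i ((map.headD []).length - 2) = 1)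

theorem mem_LA (map : List (List Int)) (hn : 3 ≤ map.length)
    (hW : 3 ≤ (map.headD []).length) (i j : Nat) : (i, j) ∈ LA map ↔ MarkP map i j := by
  unfold LA MarkP
  simp only [List.mem_flatMap, PySem.List.mem_pyRange_one]
  constructor
  · rintro ⟨x, hx, y, hy, hp⟩
    unfold cellAI at hp
    split_ifs at hp with hc h1 h3 h4 h2 h3 h4 h3 h4 <;>
      simp only [List.mem_append, List.mem_cons, List.not_mem_nil, or_false, false_or] at hp
    · obtain hp | hp := hp <;> (rw [Prod.mk.injEq] at hp; obtain ⟨rfl, rfl⟩ := hp)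
      · left
        refine ⟨rfl, by omega, by omega, ?_⟩
        have hc2 := hc.2
        rw [show x.toNat = 1 by omega] at hc2
        exact hc2
      · right; right; left
        refine ⟨rfl, by omega, by omega, ?_⟩
        have hc2 := hc.2
        rw [show y.toNat = 1 by omega] at hc2
        exact hc2
    · obtain hp | hp := hp <;> (rw [Prod.mk.injEq] at hp; obtain ⟨rfl, rfl⟩ := hp)
      · left
        refine ⟨rfl, by omega, by omega, ?_⟩
        have hc2 := hc.2
        rw [show x.toNat = 1 by omega] at hc2
        exact hc2
      · right; right; right
        refine ⟨by omega, by omega, by omega, by omega, ?_⟩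
        have hc2 := hc.2
        rw [show y.toNat = (map.headD []).length - 2 by omega] at hc2
        exact hc2
    · rw [Prod.mk.injEq] at hp
      obtain ⟨rfl, rfl⟩ := hp
      left
      refine ⟨rfl, by omega, by omega, ?_⟩
      have hc2 := hc.2
      rw [show x.toNat = 1 by omega] at hc2
      exact hc2
    · obtain hp | hp := hp <;> (rw [Prod.mk.injEq] at hp; obtain ⟨rfl, rfl⟩ := hp)
      · right; left
        refine ⟨by omega, by omega, by omega, by omega, ?_⟩
        have hc2 := hc.2
        rw [show x.toNat = map.length - 2 by omega] at hc2
        exact hc2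
      · right; right; left
        refine ⟨rfl, by omega, by omega, ?_⟩
        have hc2 := hc.2
        rw [show y.toNat = 1 by omega] at hc2
        exact hc2
    · obtain hp | hp := hp <;> (rw [Prod.mk.injEq] at hp; obtain ⟨rfl, rfl⟩ := hp)
      · right; left
        refine ⟨by omega, by omega, by omega, by omega, ?_⟩
        have hc2 := hc.2
        rw [show x.toNat = map.length - 2 by omega] at hc2
        exact hc2
      · right; right; right
        refine ⟨by omega, by omega, by omega, by omega, ?_⟩
        have hc2 := hc.2
        rw [show y.toNat = (map.headD []).length - 2 by omega] at hc2
        exact hc2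
    · rw [Prod.mk.injEq] at hp
      obtain ⟨rfl, rfl⟩ := hp
      right; left
      refine ⟨by omega, by omega, by omega, by omega, ?_⟩
      have hc2 := hc.2
      rw [show x.toNat = map.length - 2 by omega] at hc2
      exact hc2
    · rw [Prod.mk.injEq] at hp
      obtain ⟨rfl, rfl⟩ := hp
      right; right; left
      refine ⟨rfl, by omega, by omega, ?_⟩
      have hc2 := hc.2
      rw [show y.toNat = 1 by omega] at hc2
      exact hc2
    · rw [Prod.mk.injEq] at hp
      obtain ⟨rfl, rfl⟩ := hp
      right; right; right
      refine ⟨by omega, by omega, by omega, by omega, ?_⟩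
      have hc2 := hc.2
      rw [show y.toNat = (map.headD []).length - 2 by omega] at hc2
      exact hc2
  · rintro (⟨h0, hj1, hjW, hrd⟩ | ⟨h0, h4n, hj1, hjW, hrd⟩ | ⟨h0, hi1, hiN, hrd⟩ |
      ⟨h0, h4w, hi1, hiN, hrd⟩)
    · refine ⟨1, ⟨le_rfl, by omega⟩, (j : Int), ⟨by omega, by omega⟩, ?_⟩
      unfold cellAI
      rw [if_pos ⟨Or.inl rfl, by simpa using hrd⟩]
      apply List.mem_append_left
      rw [if_pos rfl]
      simp only [List.mem_cons, List.not_mem_nil, or_false]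
      rw [Prod.mk.injEq]
      constructor <;> omega
    · refine ⟨(map.length : Int) - 2, ⟨by omega, by omega⟩, (j : Int), ⟨by omega, by omega⟩, ?_⟩
      unfold cellAI
      rw [if_pos ⟨Or.inr (Or.inl rfl), by
        rw [show ((map.length : Int) - 2).toNat = map.length - 2 by omega]; simpa using hrd⟩]
      apply List.mem_append_left
      rw [if_neg (by omega), if_pos rfl]
      simp only [List.mem_cons, List.not_mem_nil, or_false]
      rw [Prod.mk.injEq]
      constructor <;> omega
    · refine ⟨(i : Int), ⟨by omega, by omega⟩, 1, ⟨le_rfl, by omega⟩, ?_⟩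
      unfold cellAI
      rw [if_pos ⟨Or.inr (Or.inr (Or.inl rfl)), by simpa using hrd⟩]
      apply List.mem_append_right
      rw [if_pos rfl]
      simp only [List.mem_cons, List.not_mem_nil, or_false]
      rw [Prod.mk.injEq]
      constructor <;> omega
    · refine ⟨(i : Int), ⟨by omega, by omega⟩, ((map.headD []).length : Int) - 2,
        ⟨by omega, by omega⟩, ?_⟩
      unfold cellAI
      rw [if_pos ⟨Or.inr (Or.inr (Or.inr rfl)), by
        rw [show (((map.headD []).length : Int) - 2).toNat = (map.headD []).length - 2 by omega]
        simpa using hrd⟩]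
      apply List.mem_append_right
      rw [if_neg (by omega), if_pos rfl]
      simp only [List.mem_cons, List.not_mem_nil, or_false]
      rw [Prod.mk.injEq]
      constructor <;> omega

theorem mem_LB (map : List (List Int)) (hn : 3 ≤ map.length)
    (hW : 3 ≤ (map.headD []).length) (i j : Nat) : (i, j) ∈ LB map ↔ MarkP map i j := by
  unfold LB MarkP
  simp only [List.mem_append, List.mem_flatMap, PySem.List.mem_pyRange_one]
  constructor
  · rintro ((⟨y, hy, hp⟩ | hbot) | ⟨x, hx, hp⟩)
    · unfold cellBtop at hp
      split_ifs at hp with h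
      · simp only [List.mem_cons, List.not_mem_nil, or_false] at hp
        rw [Prod.mk.injEq] at hp
        obtain ⟨rfl, rfl⟩ := hp
        exact Or.inl ⟨rfl, by omega, by omega, h⟩
      · exact absurd hp (by simp)
    · split_ifs at hbot with h4
      · obtain ⟨y, hy, hp⟩ := List.mem_flatMap.mp hbot
        rw [PySem.List.mem_pyRange_one] at hy
        unfold cellBbot at hp
        split_ifs at hp with h
        · simp only [List.mem_cons, List.not_mem_nil, or_false] at hp
          rw [Prod.mk.injEq] at hp
          obtain ⟨rfl, rfl⟩ := hp
          exact Or.inr (Or.inl ⟨by omega, by omega, by omega, by omega, h⟩)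
        · exact absurd hp (by simp)
      · exact absurd hbot (by simp)
    · unfold cellBside at hp
      rw [List.mem_append] at hp
      rcases hp with hp | hp
      · split_ifs at hp with h
        · simp only [List.mem_cons, List.not_mem_nil, or_false] at hp
          rw [Prod.mk.injEq] at hp
          obtain ⟨rfl, rfl⟩ := hp
          exact Or.inr (Or.inr (Or.inl ⟨rfl, by omega, by omega, h⟩))
        · exact absurd hp (by simp)
      · split_ifs at hp with h
        · simp only [List.mem_cons, List.not_mem_nil, or_false] at hp
          rw [Prod.mk.injEq] at hp
          obtain ⟨rfl, rfl⟩ := hp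
          exact Or.inr (Or.inr (Or.inr ⟨by omega, by omega, by omega, by omega, h.2⟩))
        · exact absurd hp (by simp)
  · rintro (⟨h0, hj1, hjW, hrd⟩ | ⟨h0, h4n, hj1, hjW, hrd⟩ | ⟨h0, hi1, hiN, hrd⟩ |
      ⟨h0, h4w, hi1, hiN, hrd⟩)
    · left; left
      refine ⟨(j : Int), ⟨by omega, by omega⟩, ?_⟩
      unfold cellBtop
      rw [if_pos (by simpa using hrd)]
      simp only [List.mem_cons, List.not_mem_nil, or_false]
      rw [Prod.mk.injEq]
      constructor <;> omega
    · left; right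
      rw [if_pos (show (4 : Int) ≤ (map.length : Int) by omega)]
      rw [List.mem_flatMap]
      refine ⟨(j : Int), ?_, ?_⟩
      · rw [PySem.List.mem_pyRange_one]
        constructor <;> omega
      · unfold cellBbot
        rw [if_pos (by simpa using hrd)]
        simp only [List.mem_cons, List.not_mem_nil, or_false]
        rw [Prod.mk.injEq]
        constructor <;> omega
    · right
      refine ⟨(i : Int), ⟨by omega, by omega⟩, ?_⟩
      unfold cellBside
      apply List.mem_append_left
      rw [if_pos (by simpa using hrd)]
      simp only [List.mem_cons, List.not_mem_nil, or_false]
      rw [Prod.mk.injEq]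
      constructor <;> omega
    · right
      refine ⟨(i : Int), ⟨by omega, by omega⟩, ?_⟩
      unfold cellBside
      apply List.mem_append_right
      rw [if_pos ⟨by omega, by simpa using hrd⟩]
      simp only [List.mem_cons, List.not_mem_nil, or_false]
      rw [Prod.mk.injEq]
      constructor <;> omega

theorem main_eq (map : List (List Int)) : to_goal_map map = to_goal_map_alt map := by
  by_cases hmain : 3 ≤ map.length ∧ 3 ≤ (map.headD []).length
  · rw [factA, factB map hmain.1 hmain.2]
    refine foldl_wrN_congr _ _ map (fun p => ?_)
    rcases p with ⟨i, j⟩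
    exact (mem_LA map hmain.1 hmain.2 i j).trans (mem_LB map hmain.1 hmain.2 i j).symm
  · have hLA : LA map = [] := by
      unfold LA
      by_cases h : map.length ≤ 2
      · rw [show (PySem.List.pyRange 1 ((map.length : Int) - 1) 1) = ([] : List Int) from
          PySem.List.pyRange_one_eq_nil (by omega)]
        rfl
      · rw [show (PySem.List.pyRange 1 (((map.headD []).length : Int) - 1) 1) = ([] : List Int) from
          PySem.List.pyRange_one_eq_nil (by omega)]
        simp
    have hB : to_goal_map_alt map = map := by
      unfold to_goal_map_alt
      rw [if_neg (by omega)]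
    rw [factA, hLA, hB]
    rfl

-- ===== VERDICT (by name: the statement is the Claim_ definition above) =====
theorem to_goal_map_spec : Claim_equal_to_goal_map := by
  intro map _ _
  unfold Spec_to_goal_map
  exact main_eq map
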